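-- pv_equiv track=rewrite | github.com/MatthewDaws/AdventCode22 | advent/day6.py | find_marker_second
-- ===== SOURCE A (Python) =====
-- def check_back(txt, start, search_size):
--     for i in range(1, min(start, search_size)):
--         if txt[start-i-1] == txt[start-1]:
--             return i
--     return -1
--
-- def find_marker_second(txt, distinct=4):
--     smallest_start = distinct
--     for n in range(1, len(txt)+1):
--         b = check_back(txt, n, distinct)
--         if b != -1:
--             smallest_start = max(smallest_start, n - b + distinct)
--         else:
--             if n >= smallest_start:
--                 return n
--     return None
-- ===== SOURCE B (Python) =====
-- def find_marker_second(txt, distinct=4):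
--     last = {}
--     start = 0
--     for i, c in enumerate(txt):
--         j = last.get(c)
--         if j is not None and j >= start:
--             start = j + 1
--         last[c] = i
--         if i + 1 >= distinct and i + 1 - start >= distinct:
--             return i + 1
--     return None
-- ===== Notes on version B (the rewrite author's own statement) =====
-- stated objective: faster
-- what changed: A's per-position duplicate lookback (check_back) with smallest_start bookkeeping is replaced by a single sliding-window pass keeping a last-seen-index dict and the current window start
import Mathlib
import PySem

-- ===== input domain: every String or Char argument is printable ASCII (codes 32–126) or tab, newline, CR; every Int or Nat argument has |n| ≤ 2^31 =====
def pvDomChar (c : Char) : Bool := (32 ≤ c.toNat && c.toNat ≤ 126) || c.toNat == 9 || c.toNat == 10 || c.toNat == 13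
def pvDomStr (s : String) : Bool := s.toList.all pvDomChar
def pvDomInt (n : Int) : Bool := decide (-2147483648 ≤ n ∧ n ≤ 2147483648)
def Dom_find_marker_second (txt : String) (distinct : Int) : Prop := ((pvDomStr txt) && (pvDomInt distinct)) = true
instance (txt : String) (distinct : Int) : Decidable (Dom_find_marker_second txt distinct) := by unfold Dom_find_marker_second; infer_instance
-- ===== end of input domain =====

-- B replaces A's per-position duplicate lookback (check_back) plus smallest_start
-- bookkeeping by a single sliding-window pass with a last-seen-index dict.

-- ===== PORT A =====
-- helper: the body of check_back's `for i in range(1, min(start, search_size))` loop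
def check_back_go (txt : List Char) (start : Int) : List Int → Int
  | [] => -1
  | i :: rest =>
    if PySem.List.pyGet? txt (start - i - 1) = PySem.List.pyGet? txt (start - 1) then i
    else check_back_go txt start rest

def check_back (txt : List Char) (start search_size : Int) : Int :=
  check_back_go txt start (PySem.List.pyRange 1 (min start search_size) 1)

-- the body of A's `for n in range(1, len(txt)+1)` loop, with state smallest_start
def fms_go (txt : List Char) (distinct : Int) : Int → List Int → Option Int
  | _, [] => none
  | ss, n :: rest =>
    let b := check_back txt n distinct
    if b ≠ -1 then fms_go txt distinct (max ss (n - b + distinct)) rest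
    else if n ≥ ss then some n
    else fms_go txt distinct ss rest

def find_marker_second (txt : String) (distinct : Int) : Option Int :=
  fms_go txt.toList distinct distinct (PySem.List.pyRange 1 (PySem.Str.len txt + 1) 1)

-- ===== PORT B =====
-- the body of B's `for i, c in enumerate(txt)` loop, with state (start, last)
def fms_alt_go (distinct : Int) : Int → PySem.Dict Char Int → List (Int × Char) → Option Int
  | _, _, [] => none
  | start, last, (i, c) :: rest =>
    let start' := match last.get? c with
      | some j => if j ≥ start then j + 1 else start
      | none => start
    let last' := last.insert c i
    if i + 1 ≥ distinct ∧ i + 1 - start' ≥ distinct then some (i + 1)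
    else fms_alt_go distinct start' last' rest

def find_marker_second_alt (txt : String) (distinct : Int) : Option Int :=
  fms_alt_go distinct 0 PySem.Dict.empty (PySem.List.enumerate txt.toList 0)

-- ===== PRECONDITION & SPEC =====
def Spec_find_marker_second (txt : String) (distinct : Int) (out : Option Int) : Prop := out = find_marker_second_alt txt distinct
instance (txt : String) (distinct : Int) (out : Option Int) : Decidable (Spec_find_marker_second txt distinct out) := by unfold Spec_find_marker_second; infer_instance

-- ===== CLAIM (what is proved, stated in full; the proofs are below) =====
def Claim_equal_find_marker_second : Prop := ∀ (txt : String) (distinct : Int), Dom_find_marker_second txt distinct → Spec_find_marker_second txt distinct (find_marker_second txt distinct)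

-- ===== LEMMAS AND PROOFS =====

-- the window of the last `d` characters before (1-indexed) position n
def pvWin (L : List Char) (d n : Int) : List Char :=
  PySem.List.slice L (some (n - d)) (some n)

-- a duplicated pair of 0-indexed positions in L
def pvDup (L : List Char) (p k : Nat) : Prop := p < k ∧ k < L.length ∧ L[p]? = L[k]?

-- A's loop invariant on smallest_start before processing position n: ss dominates
-- p+1+distinct for every close duplicate pair seen so far, and is either still the
-- initial value or realised by such a pair.
def pvInv (L : List Char) (d n ss : Int) : Prop :=
  d ≤ ss ∧
  (∀ p k : Nat, pvDup L p k → (k : Int) + 1 < n → (k : Int) - (p : Int) < d → (p : Int) + 1 + d ≤ ss) ∧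
  (ss = d ∨ ∃ p k : Nat, pvDup L p k ∧ (k : Int) + 1 < n ∧ (k : Int) - (p : Int) < d ∧ ss = (p : Int) + 1 + d)

-- `txt[start-i-1] == txt[start-1]` at lookback distance i
def pvHit (L : List Char) (n i : Int) : Prop :=
  PySem.List.pyGet? L (n - i - 1) = PySem.List.pyGet? L (n - 1)

-- windows decoded: Nodup of the window ↔ no duplicate pair inside it
lemma pvNodup_win_iff (L : List Char) (d n : Int) (hd : d ≤ n) (h0 : 0 ≤ n) :
    (pvWin L d n).Nodup ↔
      ∀ p k : Nat, pvDup L p k → (k : Int) < n → n - d ≤ (p : Int) → False := by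
  have hw : pvWin L d n = (L.drop (n - d).toNat).take (n.toNat - (n - d).toNat) :=
    PySem.List.slice_toNat L (by omega) h0
  rw [hw, List.nodup_iff_getElem?_ne_getElem?]
  set s := (n - d).toNat with hs
  set t := n.toNat - s with ht
  constructor
  · intro h p k hdup hk hp
    obtain ⟨hpk, hkL, heq⟩ := hdup
    have hi : p - s < k - s := by omega
    have hj : k - s < ((L.drop s).take t).length := by
      simp [List.length_take, List.length_drop]
      omega
    have := h (p - s) (k - s) hi hj
    apply this
    rw [List.getElem?_take, List.getElem?_take, if_pos (by omega), if_pos (by omega),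
      List.getElem?_drop, List.getElem?_drop]
    rw [show s + (p - s) = p by omega, show s + (k - s) = k by omega]
    exact heq
  · intro h i j hij hj heq
    have hjlen : j < ((L.drop s).take t).length := hj
    simp [List.length_take, List.length_drop] at hjlen
    rw [List.getElem?_take, List.getElem?_take, if_pos (by omega), if_pos hjlen.1,
      List.getElem?_drop, List.getElem?_drop] at heq
    exact h (s + i) (s + j) ⟨by omega, by omega, heq⟩ (by omega) (by omega)

-- check_back's inner loop: first hit in the index list, else -1
lemma pvCbGo_spec (L : List Char) (n m : Int) :
    ∀ (cnt : Nat) (i0 : Int), m - i0 ≤ cnt →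
      (check_back_go L n (PySem.List.pyRange i0 m 1) = -1 ∧
        ∀ i, i0 ≤ i → i < m → ¬ pvHit L n i) ∨
      (∃ r, check_back_go L n (PySem.List.pyRange i0 m 1) = r ∧ i0 ≤ r ∧ r < m ∧
        pvHit L n r ∧ ∀ i, i0 ≤ i → i < r → ¬ pvHit L n i) := by
  intro cnt
  induction cnt with
  | zero =>
    intro i0 hle
    rw [PySem.List.pyRange_one_eq_nil (by omega)]
    exact Or.inl ⟨rfl, fun i h1 h2 => absurd h2 (by omega)⟩
  | succ c ih =>
    intro i0 hle
    by_cases him : m ≤ i0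
    · rw [PySem.List.pyRange_one_eq_nil him]
      exact Or.inl ⟨rfl, fun i h1 h2 => absurd h2 (by omega)⟩
    · rw [PySem.List.pyRange_one_cons (by omega)]
      by_cases hh : PySem.List.pyGet? L (n - i0 - 1) = PySem.List.pyGet? L (n - 1)
      · refine Or.inr ⟨i0, ?_, le_refl _, by omega, hh, fun i h1 h2 => absurd h2 (by omega)⟩
        simp [check_back_go, hh]
      · have hgo : check_back_go L n (i0 :: PySem.List.pyRange (i0 + 1) m 1) =
            check_back_go L n (PySem.List.pyRange (i0 + 1) m 1) := by
          simp [check_back_go, hh]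
        rw [hgo]
        rcases ih (i0 + 1) (by omega) with ⟨h1, h2⟩ | ⟨r, hr, hr1, hr2, hr3, hr4⟩
        · refine Or.inl ⟨h1, fun i hi1 hi2 hhit => ?_⟩
          rcases eq_or_lt_of_le hi1 with rfl | hlt
          · exact hh hhit
          · exact h2 i (by omega) hi2 hhit
        · refine Or.inr ⟨r, hr, by omega, hr2, hr3, fun i hi1 hi2 hhit => ?_⟩
          rcases eq_or_lt_of_le hi1 with rfl | hlt
          · exact hh hhit
          · exact hr4 i (by omega) hi2 hhit

-- hits at position n are exactly close duplicate pairs ending at n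
lemma pvHit_iff_dup (L : List Char) (d n i : Int) (h1 : 1 ≤ n) (hn : n ≤ (L.length : Int))
    (hi1 : 1 ≤ i) (him : i < min n d) :
    pvHit L n i ↔ pvDup L (n - i - 1).toNat (n - 1).toNat := by
  have hp0 : 0 ≤ n - i - 1 := by omega
  have hk0 : 0 ≤ n - 1 := by omega
  unfold pvHit pvDup
  rw [PySem.List.pyGet?_of_nonneg L hp0, PySem.List.pyGet?_of_nonneg L hk0]
  constructor
  · intro h; exact ⟨by omega, by omega, h⟩
  · intro ⟨_, _, h⟩; exact h

-- A's loop computes the first n ≥ distinct in the range whose window is duplicate-free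
lemma pvFmsGo_spec (L : List Char) (d : Int) :
    ∀ (cnt : Nat) (n ss : Int), 1 ≤ n → (L.length : Int) + 1 - n ≤ cnt → pvInv L d n ss →
      fms_go L d ss (PySem.List.pyRange n ((L.length : Int) + 1) 1) =
        (PySem.List.pyRange n ((L.length : Int) + 1) 1).find?
          (fun m => decide (d ≤ m ∧ (pvWin L d m).Nodup)) := by
  intro cnt
  induction cnt with
  | zero =>
    intro n ss _ hle _
    rw [PySem.List.pyRange_one_eq_nil (by omega)]
    rfl
  | succ c ih =>
    intro n ss hn1 hle hinv
    obtain ⟨hdss, hA, hC⟩ := hinv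
    by_cases hend : (L.length : Int) + 1 ≤ n
    · rw [PySem.List.pyRange_one_eq_nil hend]; rfl
    · have hnN : n ≤ (L.length : Int) := by omega
      rw [PySem.List.pyRange_one_cons (by omega)]
      simp only [fms_go]
      rcases pvCbGo_spec L n (min n d) (min n d - 1).toNat 1 (by omega) with
        ⟨hcb, hnohit⟩ | ⟨r, hcb, hr1, hrm, hrhit, hrmin⟩
      · -- check_back returned -1 : no close duplicate ends at position n
        have hb : check_back L n d = -1 := hcb
        rw [hb, if_neg (by omega)]
        have hno_end : ∀ p : Nat, pvDup L p (n - 1).toNat → (n - 1) - (p : Int) < d → False := by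
          intro p hdup hclose
          have hpk : (p : Int) < n - 1 := by
            have := hdup.1
            omega
          have hi1 : (1 : Int) ≤ n - 1 - p := by omega
          have him : n - 1 - p < min n d := by omega
          apply hnohit (n - 1 - (p : Int)) (by omega) him
          rw [pvHit_iff_dup L d n _ (by omega) (by omega) hi1 him]
          rw [show (n - (n - 1 - (p : Int)) - 1).toNat = p by omega]
          exact hdup
        by_cases hss : ss ≤ n
        · -- A returns n; n's window is duplicate-free
          rw [if_pos (by omega)]
          have hpred : (pvWin L d n).Nodup := by
            rw [pvNodup_win_iff L d n (by omega) (by omega)]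
            intro p k hdup hk hp
            by_cases hk1 : (k : Int) = n - 1
            · exact hno_end p (by rw [show (n-1).toNat = k by omega]; exact hdup) (by omega)
            · have := hA p k hdup (by omega) (by omega)
              omega
          rw [List.find?_cons_of_pos (by simp [hpred]; omega)]
        · -- n < smallest_start: n's window has a duplicate recorded in ss
          rw [if_neg (by omega)]
          have hpred : ¬ (d ≤ n ∧ (pvWin L d n).Nodup) := by
            rintro ⟨hdn, hnd⟩
            rcases hC with rfl | ⟨p, k, hdup, hkn, hkp, hsse⟩
            · omega
            · exact (pvNodup_win_iff L d n hdn (by omega)).mp hnd p k hdup (by omega) (by omega)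
          rw [List.find?_cons_of_neg (by simpa using hpred)]
          apply ih (n + 1) ss (by omega) (by omega)
          refine ⟨hdss, ?_, ?_⟩
          · intro p k hdup hk hkp
            by_cases hk1 : (k : Int) = n - 1
            · exact absurd (hno_end p (by rw [show (n-1).toNat = k by omega]; exact hdup)
                (by omega)) not_false
            · exact hA p k hdup (by omega) hkp
          · rcases hC with rfl | ⟨p, k, h1, h2, h3, h4⟩
            · exact Or.inl rfl
            · exact Or.inr ⟨p, k, h1, by omega, h3, h4⟩
      · -- check_back found the nearest duplicate at lookback distance r
        have hb : check_back L n d = r := hcb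
        rw [hb, if_pos (by omega)]
        have hp0 : ((n - r - 1).toNat : Int) = n - r - 1 := Int.toNat_of_nonneg (by omega)
        have hk0 : ((n - 1).toNat : Int) = n - 1 := Int.toNat_of_nonneg (by omega)
        have hdup0 : pvDup L (n - r - 1).toNat (n - 1).toNat := by
          rw [← pvHit_iff_dup L d n r (by omega) (by omega) hr1 hrm]
          exact hrhit
        have hpred : ¬ (d ≤ n ∧ (pvWin L d n).Nodup) := by
          rintro ⟨hdn, hnd⟩
          exact (pvNodup_win_iff L d n hdn (by omega)).mp hnd _ _ hdup0 (by omega) (by omega)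
        rw [List.find?_cons_of_neg (by simpa using hpred)]
        apply ih (n + 1) (max ss (n - r + d)) (by omega) (by omega)
        refine ⟨by omega, ?_, ?_⟩
        · intro p k hdup hk hkp
          by_cases hk1 : (k : Int) = n - 1
          · -- a pair ending at n: the nearest hit bounds p from above
            have hi1 : (1 : Int) ≤ n - 1 - p := by have := hdup.1; omega
            have him : n - 1 - (p : Int) < min n d := by omega
            have hhit : pvHit L n (n - 1 - (p : Int)) := by
              rw [pvHit_iff_dup L d n _ (by omega) (by omega) hi1 him]
              rw [show (n - (n - 1 - (p : Int)) - 1).toNat = p by omega]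
              rw [show (n - 1).toNat = k by omega]
              exact hdup
            have hge : ¬ (n - 1 - (p : Int) < r) := fun hlt =>
              hrmin _ (by omega) hlt hhit
            omega
          · have := hA p k hdup (by omega) hkp
            omega
        · by_cases hm : n - r + d ≤ ss
          · rw [max_eq_left hm]
            rcases hC with rfl | ⟨p, k, h1, h2, h3, h4⟩
            · exact Or.inl rfl
            · exact Or.inr ⟨p, k, h1, by omega, h3, h4⟩
          · rw [max_eq_right (by omega)]
            exact Or.inr ⟨(n - r - 1).toNat, (n - 1).toNat, hdup0, by omega, by omega, by omega⟩


def pvLastInv (L : List Char) (i : Nat) (dct : PySem.Dict Char Int) : Prop :=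
  ∀ (c : Char) (j : Int), dct.get? c = some j ↔
    (0 ≤ j ∧ j < (i : Int) ∧ L[j.toNat]? = some c ∧
      ∀ q : Nat, j < (q : Int) → q < i → L[q]? ≠ some c)

-- a character occurring before i has a last occurrence before i
lemma pvLastOcc (L : List Char) (c : Char) :
    ∀ i : Nat, (∃ q : Nat, q < i ∧ L[q]? = some c) →
      ∃ j : Nat, j < i ∧ L[j]? = some c ∧ ∀ q : Nat, j < q → q < i → L[q]? ≠ some c := by
  intro i
  induction i with
  | zero => rintro ⟨q, h, -⟩; omega
  | succ m ih =>
    rintro ⟨q, hq, hc⟩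
    by_cases hm : L[m]? = some c
    · exact ⟨m, by omega, hm, fun q h1 h2 => by omega⟩
    · have hq' : q < m := by
        rcases Nat.lt_succ_iff_lt_or_eq.mp hq with h | h
        · exact h
        · subst h; exact absurd hc hm
      obtain ⟨j, h1, h2, h3⟩ := ih ⟨q, hq', hc⟩
      refine ⟨j, by omega, h2, fun q hq1 hq2 => ?_⟩
      by_cases hqe : q = m
      · subst hqe; exact hm
      · exact h3 q hq1 (by omega)

lemma pvLastInv_insert (L : List Char) (i : Nat) (c : Char) (dct : PySem.Dict Char Int)
    (hLc : L[i]? = some c) (hinv : pvLastInv L i dct) :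
    pvLastInv L (i + 1) (dct.insert c (i : Int)) := by
  intro c' j
  by_cases hc : c' = c
  · subst hc
    rw [PySem.Dict.get?_insert_self]
    constructor
    · rintro h
      injection h with h
      subst h
      exact ⟨by positivity, by push_cast; omega, by simpa using hLc, fun q h1 h2 => by omega⟩
    · rintro ⟨h0, h1, h2, h3⟩
      by_cases hji : j = (i : Int)
      · rw [hji]
      · exact absurd hLc (h3 i (by omega) (by omega))
  · rw [PySem.Dict.get?_insert_of_ne _ _ hc, hinv c' j]
    constructor
    · rintro ⟨h0, h1, h2, h3⟩
      refine ⟨h0, by omega, h2, fun q hq1 hq2 => ?_⟩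
      by_cases hqe : q = i
      · subst hqe
        rw [hLc]
        intro hcc
        exact hc (by injection hcc with h; exact h.symm)
      · exact h3 q hq1 (by omega)
    · rintro ⟨h0, h1, h2, h3⟩
      have hji : j ≠ (i : Int) := by
        intro hji
        rw [hji] at h2
        simp only [Int.toNat_natCast] at h2
        rw [hLc] at h2
        exact hc (by injection h2 with h; exact h.symm)
      exact ⟨h0, by omega, h2, fun q hq1 hq2 => h3 q hq1 (by omega)⟩

lemma pvAltGo_spec (L : List Char) (d : Int) :
    ∀ (xs : List Char) (i : Nat) (start : Int) (dct : PySem.Dict Char Int),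
      xs = L.drop i → i ≤ L.length → 0 ≤ start → start ≤ (i : Int) →
      (∀ p k : Nat, start ≤ (p : Int) → pvDup L p k → k < i → False) →
      (start = 0 ∨ ∃ k : Nat, start ≤ (k : Int) ∧ k < i ∧ pvDup L (start - 1).toNat k) →
      pvLastInv L i dct →
      fms_alt_go d start dct (PySem.List.enumerate xs (i : Int)) =
        (PySem.List.pyRange ((i : Int) + 1) ((L.length : Int) + 1) 1).find?
          (fun m => decide (d ≤ m ∧ (pvWin L d m).Nodup)) := by
  intro xs
  induction xs with
  | nil =>
    intro i start dct hxs hiN _ _ _ _ _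
    have hlen : L.length ≤ i := List.drop_eq_nil_iff.mp hxs.symm
    rw [PySem.List.enumerate_nil, PySem.List.pyRange_one_eq_nil (by omega)]
    rfl
  | cons c xs' ih =>
    intro i start dct hxs hiN hs0 hsi hnd hmin hlast
    have hi : i < L.length := by
      have := congrArg List.length hxs
      simp only [List.length_cons, List.length_drop] at this
      omega
    have hLc : L[i]? = some c := by
      have h0 : (L.drop i)[0]? = some c := by rw [← hxs]; rfl
      rwa [List.getElem?_drop, Nat.add_zero] at h0
    have hxs' : xs' = L.drop (i + 1) := by
      have := congrArg List.tail hxs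
      simpa [List.tail_drop] using this
    -- occurrences of c before i are bounded by the recorded last index
    have hocc_le : ∀ j : Int, dct.get? c = some j →
        ∀ q : Nat, q < i → L[q]? = some c → (q : Int) ≤ j := by
      intro j hj q hq hqc
      obtain ⟨-, -, -, h3⟩ := (hlast c j).mp hj
      by_contra hgt
      exact h3 q (by omega) hq hqc
    have hnone : dct.get? c = none → ∀ q : Nat, q < i → L[q]? ≠ some c := by
      intro hn q hq hqc
      obtain ⟨j, h1, h2, h3⟩ := pvLastOcc L c i ⟨q, hq, hqc⟩
      have : dct.get? c = some (j : Int) := (hlast c (j : Int)).mpr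
        ⟨by positivity, by omega, by simpa using h2, fun q' hq1 hq2 => h3 q' (by omega) hq2⟩
      rw [hn] at this
      simp at this
    rw [PySem.List.enumerate_cons]
    simp only [fms_alt_go]
    -- the three update branches all yield a start' with the window invariants at i+1
    have hkey : ∀ start' : Int,
        start' = (match dct.get? c with
          | some j => if j ≥ start then j + 1 else start
          | none => start) →
        (0 ≤ start' ∧ start' ≤ (i : Int) + 1 ∧
          (∀ p k : Nat, start' ≤ (p : Int) → pvDup L p k → k < i + 1 → False) ∧
          (start' = 0 ∨ ∃ k : Nat, start' ≤ (k : Int) ∧ k < i + 1 ∧ pvDup L (start' - 1).toNat k)) := by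
      intro start' hs'
      rcases hget : dct.get? c with - | j
      · rw [hget] at hs'; simp only at hs'; subst hs'
        refine ⟨hs0, by omega, ?_, ?_⟩
        · intro p k hp hdup hk
          by_cases hki : k = i
          · subst hki
            have : L[p]? = some c := by rw [hdup.2.2, hLc]
            exact hnone hget p hdup.1 this
          · exact hnd p k hp hdup (by omega)
        · rcases hmin with h | ⟨k, h1, h2, h3⟩
          · exact Or.inl h
          · exact Or.inr ⟨k, h1, by omega, h3⟩
      · have hjprops := (hlast c j).mp hget
        obtain ⟨hj0, hji, hjc, hjmax⟩ := hjprops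
        rw [hget] at hs'
        simp only at hs'
        by_cases hjs : j ≥ start
        · rw [if_pos hjs] at hs'; subst hs'
          refine ⟨by omega, by omega, ?_, ?_⟩
          · intro p k hp hdup hk
            by_cases hki : k = i
            · subst hki
              have hpc : L[p]? = some c := by rw [hdup.2.2, hLc]
              exact hjmax p (by omega) hdup.1 hpc
            · exact hnd p k (by omega) hdup (by omega)
          · refine Or.inr ⟨i, by omega, by omega, ?_⟩
            refine ⟨by omega, hi, ?_⟩
            rw [show (j + 1 - 1).toNat = j.toNat by omega]
            rw [hjc, hLc]
        · rw [if_neg hjs] at hs'; subst hs'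
          refine ⟨hs0, by omega, ?_, ?_⟩
          · intro p k hp hdup hk
            by_cases hki : k = i
            · subst hki
              have hpc : L[p]? = some c := by rw [hdup.2.2, hLc]
              have := hocc_le j hget p hdup.1 hpc
              omega
            · exact hnd p k hp hdup (by omega)
          · rcases hmin with h | ⟨k, h1, h2, h3⟩
            · exact Or.inl h
            · exact Or.inr ⟨k, h1, by omega, h3⟩
    obtain ⟨hs'0, hs'le, hnd', hmin'⟩ := hkey _ rfl
    set start' := (match dct.get? c with
      | some j => if j ≥ start then j + 1 else start
      | none => start) with hs'def
    have hrange : PySem.List.pyRange ((i : Int) + 1) ((L.length : Int) + 1) 1 =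
        ((i : Int) + 1) :: PySem.List.pyRange ((i : Int) + 1 + 1) ((L.length : Int) + 1) 1 :=
      PySem.List.pyRange_one_cons (by omega)
    rw [hrange]
    by_cases hcond : (i : Int) + 1 ≥ d ∧ (i : Int) + 1 - start' ≥ d
    · rw [if_pos hcond, List.find?_cons_of_pos]
      simp only [decide_eq_true_eq]
      refine ⟨by omega, ?_⟩
      rw [pvNodup_win_iff L d ((i : Int) + 1) (by omega) (by omega)]
      intro p k hdup hk hp
      exact hnd' p k (by omega) hdup (by omega)
    · rw [if_neg hcond, List.find?_cons_of_neg]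
      · have hgoal := ih (i + 1) start' (dct.insert c (i : Int)) hxs' (by omega) hs'0
          (by push_cast; omega)
          (by intro p k hp hdup hk; exact hnd' p k hp hdup (by omega))
          (by rcases hmin' with h | ⟨k, h1, h2, h3⟩
              · exact Or.inl h
              · exact Or.inr ⟨k, h1, by omega, h3⟩)
          (pvLastInv_insert L i c dct hLc hlast)
        push_cast at hgoal
        exact hgoal
      · simp only [decide_eq_true_eq, not_and]
        intro hdn hnodup
        apply hcond
        refine ⟨hdn, ?_⟩
        by_contra hlt
        rcases hmin' with h | ⟨k, h1, h2, h3⟩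
        · omega
        · refine (pvNodup_win_iff L d ((i : Int) + 1) hdn (by omega)).mp hnodup
            (start' - 1).toNat k h3 (by omega) (by omega)

-- ===== VERDICT (by name: the statement is the Claim_ definition above) =====
theorem find_marker_second_spec : Claim_equal_find_marker_second := by
  intro txt d _
  show find_marker_second txt d = find_marker_second_alt txt d
  unfold find_marker_second find_marker_second_alt
  rw [PySem.Str.len_eq]
  rw [pvFmsGo_spec txt.toList d (txt.toList.length + 1) 1 d (by omega) (by omega)
    ⟨le_refl d, fun p k _ hk _ => by omega, Or.inl rfl⟩]
  have hB := pvAltGo_spec txt.toList d txt.toList 0 0 PySem.Dict.empty rfl (by omega)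
    (le_refl 0) (by omega)
    (fun p k _ _ hk => by omega)
    (Or.inl rfl)
    (by
      intro c j
      rw [PySem.Dict.get?_empty]
      constructor
      · intro h; exact absurd h (by simp)
      · rintro ⟨h0, h1, -, -⟩; omega)
  simp only [Nat.cast_zero, zero_add] at hB
  exact hB.symm
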